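-- pv_equiv track=rewrite | github.com/edt-yxz-zzd/python3_src | nn_ns/parse/simple_grammar_parser.py | simple_grammar_parser
-- ===== SOURCE A (Python) =====
-- def simple_grammar_parser(grammar):
--     r'''generate args for UngerMethod() from a CF grammar
--
-- grammar is sth like:
--     S = a S
--     S = b
--
-- grammar:
--     no comments
--     allow empty lines
--     '=' is the only keyword, but can be used as rule name
--     using str.split to split out words
--     nonemptyline should be: '\s*(\S+)\s*(=)(\s*\S+)*\s*'
--
-- output is 2 input arguments of UngerMethod:
--     (nontoken_ref2rule_ids, rule_id2refs)
--
--
-- example: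
--     >>> grammar = 'S = a S\nS = b'
--     >>> result = simple_grammar_parser(grammar)
--     >>> result == \
--     ...    ({'S': ['S-0', 'S-1']}, {'S-0': ['a', 'S'], 'S-1': ['b']})
--     True
--     >>> maybe_token_refs(*result) == set('ab')
--     True
-- '''
--
--     def parse_line(line):
--         words = line.split()
--         if not (len(words) >= 2 and words[1] == '='):
--             raise ValueError('bad CFG format: SHOULD BE sth like: "S = a b"'
--                              ': lineno={} : {!r}'.format(lineno, line))
--
--         ref = words[0]
--         refs = words[2:]
--
--         if ref not in nontoken_ref2rule_ids:
--             nontoken_ref2rule_ids[ref] = []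
--
--         rks = nontoken_ref2rule_ids[ref]
--         rk = '{}-{}'.format(ref, len(rks))
--         rks.append(rk)
--
--         assert rk not in rule_id2refs
--         rule_id2refs[rk] = refs
--
--
--
--     nontoken_ref2rule_ids = {}
--     rule_id2refs = {}
--     for lineno, line in enumerate(grammar.splitlines()):
--         if not line or line.isspace():
--             continue
--
--         parse_line(line)
--
--     return nontoken_ref2rule_ids, rule_id2refs
-- ===== SOURCE B (Python) =====
-- def simple_grammar_parser(grammar):
--     # pass 1: validate each line and collect (ref, body) pairs in line order
--     pairs = []
--     for lineno, line in enumerate(grammar.splitlines()):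
--         words = line.split()
--         if not words:
--             continue
--         if len(words) < 2 or words[1] != '=':
--             raise ValueError('bad CFG format: SHOULD BE sth like: "S = a b"'
--                              ': lineno={} : {!r}'.format(lineno, line))
--         pairs.append((words[0], words[2:]))
--     # pass 2: number the rules with a running counter, then build the
--     # grouping dict afterwards from the final counts
--     counts = {}
--     rule_id2refs = {}
--     for ref, refs in pairs:
--         i = counts.get(ref, 0)
--         counts[ref] = i + 1
--         rule_id2refs['{}-{}'.format(ref, i)] = refs
--     nontoken_ref2rule_ids = {
--         ref: ['{}-{}'.format(ref, i) for i in range(n)]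
--         for ref, n in counts.items()}
--     return nontoken_ref2rule_ids, rule_id2refs
-- ===== Notes on version B (the rewrite author's own statement) =====
-- stated objective: alternative
-- what changed: Replaces A's single pass that mutates both result dicts through a closure (appending each new rule id to a per-ref list stored inside the result) by a collect-then-generate two-pass shape: pass 1 only validates and collects (ref, body) pairs, pass 2 numbers rules with a running counter dict and derives the ref->rule-ids grouping afterwards from the final counts by a comprehension.
-- outside the precondition, e.g. on simple_grammar_parser('='): A raises ValueError, B raises ValueError
import Mathlib
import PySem

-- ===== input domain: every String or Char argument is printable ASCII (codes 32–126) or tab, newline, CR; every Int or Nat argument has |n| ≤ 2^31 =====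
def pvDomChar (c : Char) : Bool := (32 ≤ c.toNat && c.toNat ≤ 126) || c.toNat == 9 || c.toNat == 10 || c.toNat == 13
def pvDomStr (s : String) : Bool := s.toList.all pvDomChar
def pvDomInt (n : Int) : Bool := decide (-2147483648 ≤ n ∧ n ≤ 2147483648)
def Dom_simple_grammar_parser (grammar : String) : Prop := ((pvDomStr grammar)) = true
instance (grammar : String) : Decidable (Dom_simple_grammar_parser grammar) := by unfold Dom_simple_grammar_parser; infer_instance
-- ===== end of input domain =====

-- B replaces A's single closure-mutating pass by a collect-then-generate two-pass shape (pass 1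
-- validates and collects (ref, body) pairs, pass 2 numbers rules with a counter and derives the
-- grouping from the final counts); same cost, different decomposition.

-- ===== PORT A =====
-- parse_line: on an invalid line Python raises ValueError (such inputs are excluded by Pre_);
-- the port returns the state unchanged there.  words[0]/words[1] are guarded by len(words) >= 2,
-- so List.getD is exact; words[2:] on a list is List.drop 2 (nonnegative slice, exact).
def pvParseLineA (st : PySem.Dict String (List String) × PySem.Dict String (List String))
    (line : String) : PySem.Dict String (List String) × PySem.Dict String (List String) :=
  let words := PySem.Str.split₀ line
  if 2 ≤ words.length ∧ words.getD 1 "" = "=" then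
    let ref := words.getD 0 ""
    let refs := words.drop 2
    let d := if st.1.contains ref then st.1 else st.1.insert ref []
    let rks := d.getD ref []
    let rk := ref ++ "-" ++ PySem.Int.toStr (PySem.List.len rks)
    (d.insert ref (rks ++ [rk]), st.2.insert rk refs)
  else st  -- raise ValueError (outside Pre_)

def simple_grammar_parser (grammar : String) :
    (List (String × List String)) × (List (String × List String)) :=
  let st := (PySem.Str.splitlines grammar).foldl
    (fun st line => if line == "" || PySem.Str.strIsspace line then st else pvParseLineA st line)
    (PySem.Dict.empty, PySem.Dict.empty)
  (st.1.items, st.2.items)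

-- ===== PORT B =====
-- '{}-{}'.format(ref, i)
def pvRuleId (ref : String) (i : Int) : String := ref ++ "-" ++ PySem.Int.toStr i

-- the body of Source B's final dict comprehension: one grouping entry from a (ref, count) pair
def pvGroupEntry (p : String × Int) : String × List String :=
  (p.1, (PySem.List.pyRange 0 p.2 1).map (fun i => pvRuleId p.1 i))

-- pass 1 of Source B: validate and collect (ref, body) pairs
def pvCollectB (grammar : String) : List (String × List String) :=
  (PySem.Str.splitlines grammar).foldl
    (fun acc line =>
      let words := PySem.Str.split₀ line
      if words.isEmpty then acc
      else if 2 ≤ words.length ∧ words.getD 1 "" = "=" then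
        acc ++ [(words.getD 0 "", words.drop 2)]
      else acc)  -- raise ValueError (outside Pre_)
    []

def simple_grammar_parser_alt (grammar : String) :
    (List (String × List String)) × (List (String × List String)) :=
  let pairs := pvCollectB grammar
  let st := pairs.foldl
    (fun (st : PySem.Dict String Int × PySem.Dict String (List String)) p =>
      let i := st.1.getD p.1 0
      (st.1.insert p.1 (i + 1), st.2.insert (pvRuleId p.1 i) p.2))
    (PySem.Dict.empty, PySem.Dict.empty)
  (st.1.items.map pvGroupEntry, st.2.items)

-- ===== PRECONDITION & SPEC =====
-- Pre_ excludes exactly the grammars on which A raises ValueError: some non-blank line does not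
-- have at least two words with '=' as the second word (B raises the same error there).
def Pre_simple_grammar_parser (grammar : String) : Prop :=
  ∀ line ∈ PySem.Str.splitlines grammar,
    PySem.Str.split₀ line = [] ∨
      (2 ≤ (PySem.Str.split₀ line).length ∧ (PySem.Str.split₀ line).getD 1 "" = "=")
instance (grammar : String) : Decidable (Pre_simple_grammar_parser grammar) := by
  unfold Pre_simple_grammar_parser; infer_instance

def pvWitness_simple_grammar_parser : String := "S = a S\nS = b\n\nT = S S"

def Spec_simple_grammar_parser (grammar : String)
    (out : (List (String × List String)) × (List (String × List String))) : Prop :=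
  out = simple_grammar_parser_alt grammar
instance (grammar : String) (out : (List (String × List String)) × (List (String × List String))) :
    Decidable (Spec_simple_grammar_parser grammar out) := by
  unfold Spec_simple_grammar_parser; infer_instance

-- ===== CLAIM (what is proved, stated in full; the proofs are below) =====
def Claim_equal_simple_grammar_parser : Prop :=
  ∀ (grammar : String), Dom_simple_grammar_parser grammar →
    Pre_simple_grammar_parser grammar →
    Spec_simple_grammar_parser grammar (simple_grammar_parser grammar)


-- ===== LEMMAS AND PROOFS =====

-- the two loop bodies, named for the induction
def pvStepA (st : PySem.Dict String (List String) × PySem.Dict String (List String))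
    (line : String) : PySem.Dict String (List String) × PySem.Dict String (List String) :=
  if line == "" || PySem.Str.strIsspace line then st else pvParseLineA st line

def pvStepB (st : PySem.Dict String Int × PySem.Dict String (List String))
    (p : String × List String) : PySem.Dict String Int × PySem.Dict String (List String) :=
  let i := st.1.getD p.1 0
  (st.1.insert p.1 (i + 1), st.2.insert (pvRuleId p.1 i) p.2)

-- one line's contribution to pass 1 of B
def pvOne (line : String) : List (String × List String) :=
  let words := PySem.Str.split₀ line
  if words.isEmpty then []
  else if 2 ≤ words.length ∧ words.getD 1 "" = "=" then [(words.getD 0 "", words.drop 2)]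
  else []


lemma pvGo_all (cs : List Char) (acc : List (List Char))
    (h : cs.all PySem.Chars.isspace = true) :
    PySem.Chars.split₀.go cs [] acc = acc.reverse := by
  induction cs generalizing acc with
  | nil => simp [PySem.Chars.split₀.go]
  | cons c rest ih =>
    simp only [List.all_cons, Bool.and_eq_true] at h
    simp [PySem.Chars.split₀.go, h.1, ih _ h.2]

lemma pvGo_ne (cs : List Char) (cur : List Char) (acc : List (List Char))
    (h : cur ≠ [] ∨ acc ≠ []) : PySem.Chars.split₀.go cs cur acc ≠ [] := by
  induction cs generalizing cur acc with
  | nil =>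
    rcases h with h | h
    · simp [PySem.Chars.split₀.go, List.isEmpty_iff, h]
    · by_cases hc : cur.isEmpty <;> simp [PySem.Chars.split₀.go, hc, h]
  | cons c rest ih =>
    by_cases hs : PySem.Chars.isspace c
    · by_cases hc : cur.isEmpty
      · have hacc : acc ≠ [] := by
          rcases h with h | h
          · exact absurd (List.isEmpty_iff.mp hc) h
          · exact h
        simpa [PySem.Chars.split₀.go, hs, hc] using ih [] acc (Or.inr hacc)
      · simpa [PySem.Chars.split₀.go, hs, hc] using ih [] (cur.reverse :: acc) (Or.inr (by simp))
    · simpa [PySem.Chars.split₀.go, hs] using ih (c :: cur) acc (Or.inl (by simp))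

lemma pvSplit₀_eq_nil_iff (cs : List Char) :
    PySem.Chars.split₀ cs = [] ↔ cs.all PySem.Chars.isspace = true := by
  constructor
  · intro h
    induction cs with
    | nil => simp
    | cons c rest ih =>
      by_cases hs : PySem.Chars.isspace c
      · simp only [PySem.Chars.split₀, PySem.Chars.split₀.go, hs, if_true, List.isEmpty_nil] at h ⊢
        simp only [List.all_cons, hs, Bool.true_and]
        exact ih h
      · have hne := pvGo_ne rest [c] [] (Or.inl (by simp))
        simp only [PySem.Chars.split₀, PySem.Chars.split₀.go, hs] at h
        simp at hs h
        exact absurd h hne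
  · intro h; simpa [PySem.Chars.split₀] using pvGo_all cs [] h

lemma pvBlank_iff (line : String) :
    PySem.Str.split₀ line = [] ↔ (line == "" || PySem.Str.strIsspace line) = true := by
  rw [PySem.Str.split₀]
  simp only [List.map_eq_nil_iff, pvSplit₀_eq_nil_iff, Bool.or_eq_true, beq_iff_eq,
    PySem.Str.strIsspace_eq, PySem.Chars.strIsspace, Bool.and_eq_true, Bool.not_eq_true',
    List.isEmpty_eq_false_iff, ← String.toList_eq_nil_iff]
  constructor
  · intro h
    by_cases he : line.toList = []
    · exact Or.inl he
    · exact Or.inr ⟨he, h⟩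
  · rintro (h | h)
    · simp [h]
    · exact h.2

lemma pvGetD_map (l : List (String × Int)) (k : String) :
    (PySem.Dict.mk (l.map pvGroupEntry)).getD k [] =
      (PySem.List.pyRange 0 ((PySem.Dict.mk l).getD k 0) 1).map (fun i => pvRuleId k i) := by
  induction l with
  | nil => simp [PySem.Dict.getD, PySem.Dict.get?, PySem.List.pyRange]
  | cons p rest ih =>
    obtain ⟨a, n⟩ := p
    by_cases hk : a == k
    · have hk' : a = k := by simpa using hk
      simp [PySem.Dict.getD, pvGroupEntry, PySem.Dict.get?_mk_cons, hk']
    · simp only [List.map_cons, PySem.Dict.getD, pvGroupEntry, PySem.Dict.get?_mk_cons, hk,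
        Bool.false_eq_true, if_false] at ih ⊢
      exact ih

lemma pvContains_map (l : List (String × Int)) (k : String) :
    (PySem.Dict.mk (l.map pvGroupEntry)).contains k = (PySem.Dict.mk l).contains k := by
  simp [PySem.Dict.contains, List.any_map, Function.comp_def, pvGroupEntry]

lemma pvInsert_map (c : PySem.Dict String Int) (k : String) (v : Int) :
    ((PySem.Dict.mk (c.items.map pvGroupEntry)).insert k
        ((PySem.List.pyRange 0 v 1).map (fun i => pvRuleId k i))).items =
      ((c.insert k v).items).map pvGroupEntry := by
  rw [PySem.Dict.items_insert, PySem.Dict.items_insert, pvContains_map]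
  by_cases hc : (PySem.Dict.mk c.items).contains k
  · have hc' : c.contains k := by simpa [PySem.Dict.contains] using hc
    simp only [hc, if_true, List.map_map]
    apply List.map_congr_left
    intro p _
    by_cases hk : p.1 == k
    · have hk' : p.1 = k := by simpa using hk
      simp [pvGroupEntry, hk', Function.comp]
    · simp [pvGroupEntry, hk, Function.comp]
  · have hc' : ¬ c.contains k := by simpa [PySem.Dict.contains] using hc
    simp [hc', pvGroupEntry]

lemma pvNonneg_insert (c : PySem.Dict String Int) (k : String) (v : Int)
    (hv : 0 ≤ v) (h : ∀ p ∈ c.items, 0 ≤ p.2) : ∀ p ∈ (c.insert k v).items, 0 ≤ p.2 := by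
  intro p hp
  rw [PySem.Dict.mem_items_insert] at hp
  rcases hp with rfl | ⟨hp, _⟩
  · exact hv
  · exact h p hp

lemma pvStep_sim (line : String) (c : PySem.Dict String Int)
    (r : PySem.Dict String (List String))
    (hnb : ¬ PySem.Str.split₀ line = [])
    (hval : 2 ≤ (PySem.Str.split₀ line).length ∧ (PySem.Str.split₀ line).getD 1 "" = "=")
    (hnn : ∀ p ∈ c.items, 0 ≤ p.2) :
    pvStepA (PySem.Dict.mk (c.items.map pvGroupEntry), r) line =
      (let s := pvStepB (c, r) ((PySem.Str.split₀ line).getD 0 "", (PySem.Str.split₀ line).drop 2)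
       (PySem.Dict.mk (s.1.items.map pvGroupEntry), s.2)) := by
  have hguard : (line == "" || PySem.Str.strIsspace line) = false := by
    rw [← Bool.not_eq_true, ← pvBlank_iff]; exact hnb
  set ref := (PySem.Str.split₀ line).getD 0 "" with href
  set n := c.getD ref 0 with hnd
  have hn : 0 ≤ n := by
    rw [hnd, PySem.Dict.getD]
    cases hv : c.get? ref with
    | none => simp
    | some v =>
      simp only [Option.getD_some]
      exact hnn _ (PySem.Dict.mem_items_of_get?_eq_some c hv)
  have hrange : (pvRuleId ref n) = ref ++ "-" ++ PySem.Int.toStr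
      (PySem.List.len ((PySem.List.pyRange 0 n 1).map (fun i => pvRuleId ref i))) := by
    simp only [PySem.List.len_eq, List.length_map, PySem.List.length_pyRange_one]
    have : ((n - 0).toNat : Int) = n := by omega
    rw [this]; rfl
  have happend : ((PySem.List.pyRange 0 n 1).map (fun i => pvRuleId ref i)) ++ [pvRuleId ref n]
      = (PySem.List.pyRange 0 (n + 1) 1).map (fun i => pvRuleId ref i) := by
    rw [PySem.List.pyRange_one_succ_right hn, List.map_append]; rfl
  simp only [pvStepA, hguard, Bool.false_eq_true, if_false, pvParseLineA, hval.1, hval.2,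
    and_self, if_true, pvStepB]
  rw [← href, ← hnd]
  by_cases hc : c.contains ref
  · have hc' : (PySem.Dict.mk (c.items.map pvGroupEntry)).contains ref = true := by
      rw [pvContains_map]; exact hc
    simp only [hc', if_true]
    have hrks : (PySem.Dict.mk (c.items.map pvGroupEntry)).getD ref [] =
        (PySem.List.pyRange 0 n 1).map (fun i => pvRuleId ref i) := pvGetD_map c.items ref
    rw [hrks, ← hrange, happend]
    exact Prod.ext (PySem.Dict.ext (pvInsert_map c ref (n + 1))) rfl
  · have hc' : (PySem.Dict.mk (c.items.map pvGroupEntry)).contains ref = false := by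
      rw [pvContains_map]; exact Bool.eq_false_iff.mpr hc
    have hn0 : n = 0 := by
      rw [hnd, PySem.Dict.getD]
      rw [(PySem.Dict.get?_eq_none_iff_contains c ref).mpr (Bool.eq_false_iff.mpr hc)]
      rfl
    simp only [hc', Bool.false_eq_true, if_false]
    have hrks : ((PySem.Dict.mk (c.items.map pvGroupEntry)).insert ref []).getD ref [] = [] :=
      PySem.Dict.getD_insert_self _ _ _ _
    rw [hrks]
    have hrk0 : ref ++ "-" ++ PySem.Int.toStr (PySem.List.len ([] : List String))
        = pvRuleId ref n := by
      rw [hn0]; rfl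
    rw [hrk0, PySem.Dict.insert_insert_self]
    have hl : ([] : List String) ++ [pvRuleId ref n]
        = (PySem.List.pyRange 0 (n + 1) 1).map (fun i => pvRuleId ref i) := by
      rw [← happend, hn0]
      simp [PySem.List.pyRange]
    rw [hl]
    exact Prod.ext (PySem.Dict.ext (pvInsert_map c ref (n + 1))) rfl

lemma pvGetD_nonneg (c : PySem.Dict String Int) (hnn : ∀ p ∈ c.items, 0 ≤ p.2) (k : String) :
    0 ≤ c.getD k 0 := by
  rw [PySem.Dict.getD]
  cases hv : c.get? k with
  | none => simp
  | some v =>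
    simp only [Option.getD_some]
    exact hnn _ (PySem.Dict.mem_items_of_get?_eq_some c hv)

lemma pvMain (lines : List String) (c : PySem.Dict String Int)
    (r : PySem.Dict String (List String))
    (hpre : ∀ line ∈ lines, PySem.Str.split₀ line = [] ∨
      (2 ≤ (PySem.Str.split₀ line).length ∧ (PySem.Str.split₀ line).getD 1 "" = "="))
    (hnn : ∀ p ∈ c.items, 0 ≤ p.2) :
    lines.foldl pvStepA (PySem.Dict.mk (c.items.map pvGroupEntry), r) =
      (let s := (lines.flatMap pvOne).foldl pvStepB (c, r)
       (PySem.Dict.mk (s.1.items.map pvGroupEntry), s.2)) := by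
  induction lines generalizing c r with
  | nil => rfl
  | cons line rest ih =>
    have hline := hpre line (List.mem_cons_self ..)
    rcases hline with hb | hval
    · have hone : pvOne line = [] := by
        simp [pvOne, hb]
      have hg : (line == "" || PySem.Str.strIsspace line) = true := (pvBlank_iff line).mp hb
      have hskip : pvStepA (PySem.Dict.mk (c.items.map pvGroupEntry), r) line
          = (PySem.Dict.mk (c.items.map pvGroupEntry), r) := by
        simp only [pvStepA, hg, if_true]
      simp only [List.foldl_cons, List.flatMap_cons, hone, List.nil_append, hskip]
      exact ih c r (fun l hl => hpre l (List.mem_cons_of_mem _ hl)) hnn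
    · have hnb : ¬ PySem.Str.split₀ line = [] := by
        intro h; rw [h] at hval; simp at hval
      have hone : pvOne line = [(( PySem.Str.split₀ line).getD 0 "", (PySem.Str.split₀ line).drop 2)] := by
        simp only [pvOne, List.isEmpty_iff, hnb, if_false, hval, and_self, if_true]
      simp only [List.foldl_cons, List.flatMap_cons, hone, List.singleton_append,
        pvStep_sim line c r hnb hval hnn]
      have hn' : ∀ p ∈ (pvStepB (c, r)
          ((PySem.Str.split₀ line).getD 0 "", (PySem.Str.split₀ line).drop 2)).1.items, 0 ≤ p.2 := by
        show ∀ p ∈ (c.insert ((PySem.Str.split₀ line).getD 0 "")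
          (c.getD ((PySem.Str.split₀ line).getD 0 "") 0 + 1)).items, 0 ≤ p.2
        refine pvNonneg_insert c _ _ ?_ hnn
        have := pvGetD_nonneg c hnn ((PySem.Str.split₀ line).getD 0 "")
        omega
      exact ih _ _ (fun l hl => hpre l (List.mem_cons_of_mem _ hl)) hn'

lemma pvCollectB_eq_flatMap (grammar : String) :
    pvCollectB grammar = (PySem.Str.splitlines grammar).flatMap pvOne := by
  have hfun : (fun (acc : List (String × List String)) (line : String) =>
      let words := PySem.Str.split₀ line
      if words.isEmpty then acc
      else if 2 ≤ words.length ∧ words.getD 1 "" = "=" then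
        acc ++ [(words.getD 0 "", words.drop 2)]
      else acc)
      = fun acc line => acc ++ pvOne line := by
    funext acc line
    simp only [pvOne]
    split_ifs <;> simp
  rw [pvCollectB, hfun, PySem.List.foldl_append_eq_flatMap]
  simp

-- ===== VERDICT (by name: the statement is the Claim_ definition above) =====
theorem simple_grammar_parser_spec : Claim_equal_simple_grammar_parser := by
  intro grammar _ hpre
  unfold Spec_simple_grammar_parser simple_grammar_parser simple_grammar_parser_alt
  rw [pvCollectB_eq_flatMap]
  have h0 : ∀ p ∈ (PySem.Dict.empty : PySem.Dict String Int).items, 0 ≤ p.2 := by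
    intro p hp
    simp [PySem.Dict.empty] at hp
  have h : (PySem.Str.splitlines grammar).foldl pvStepA (PySem.Dict.empty, PySem.Dict.empty) =
      (let s := ((PySem.Str.splitlines grammar).flatMap pvOne).foldl pvStepB
        (PySem.Dict.empty, PySem.Dict.empty)
       (PySem.Dict.mk (s.1.items.map pvGroupEntry), s.2)) :=
    pvMain (PySem.Str.splitlines grammar) PySem.Dict.empty PySem.Dict.empty hpre h0
  show (let st := (PySem.Str.splitlines grammar).foldl pvStepA (PySem.Dict.empty, PySem.Dict.empty)
    (st.1.items, st.2.items)) = _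
  rw [h]
  rfl
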